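-- pv_equiv track=rewrite | github.com/tantshirt/rnku-pmvt-learning-system | PDG /tools/generate_learning_system.py | _estimate_study_time
-- ===== SOURCE A (Python) =====
-- def _estimate_study_time(content: str) -> str:
--     """Estimate study time based on content length."""
--     lines = len([l for l in content.split('\n') if l.strip()])
--     if lines < 200:
--         return "2-3"
--     elif lines < 500:
--         return "3-4"
--     elif lines < 1000:
--         return "4-6"
--     else:
--         return "6-8"
-- ===== SOURCE B (Python) =====
-- _THRESHOLDS = [200, 500, 1000]
-- _RESULTS = ["2-3", "3-4", "4-6", "6-8"]
--
--
-- def _estimate_study_time(content: str) -> str: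
--     """Estimate study time based on content length."""
--     lines = sum(1 for l in content.split('\n') if l.strip())
--     lo, hi = 0, len(_THRESHOLDS)
--     while lo < hi:
--         mid = (lo + hi) // 2
--         if lines < _THRESHOLDS[mid]:
--             hi = mid
--         else:
--             lo = mid + 1
--     return _RESULTS[lo]
-- ===== Notes on version B (the rewrite author's own statement) =====
-- stated objective: idiomatic
-- what changed: Replaces the if/elif threshold cascade by a table of thresholds and result labels indexed via a bisect_right-style binary search, and counts non-empty lines with a single-pass sum instead of building a filtered list.
import Mathlib
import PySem

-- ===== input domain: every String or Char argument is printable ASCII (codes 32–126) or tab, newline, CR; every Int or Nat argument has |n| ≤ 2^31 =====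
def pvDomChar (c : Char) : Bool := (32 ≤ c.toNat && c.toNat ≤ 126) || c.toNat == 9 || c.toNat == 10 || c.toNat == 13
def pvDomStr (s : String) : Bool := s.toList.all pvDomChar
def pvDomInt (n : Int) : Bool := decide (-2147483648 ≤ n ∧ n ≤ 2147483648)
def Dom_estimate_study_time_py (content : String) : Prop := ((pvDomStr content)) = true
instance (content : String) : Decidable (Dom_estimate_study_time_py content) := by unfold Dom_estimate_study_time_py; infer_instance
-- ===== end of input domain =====

-- B replaces A's if/elif threshold cascade by a threshold table indexed via a
-- bisect_right-style binary search, counting non-empty lines in one summing pass (idiomatic).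


-- ===== PORT A =====
def estimate_study_time_py (content : String) : String :=
  let lines := (((PySem.Str.split? content "\n").getD []).filter
    (fun l => !(PySem.Str.strip l == ""))).length
  if lines < 200 then "2-3"
  else if lines < 500 then "3-4"
  else if lines < 1000 then "4-6"
  else "6-8"

-- ===== PORT B =====
def pvThresholds : List Nat := [200, 500, 1000]
def pvResults : List String := ["2-3", "3-4", "4-6", "6-8"]

-- bisect_right-style binary search over pvThresholds (Source B's while loop;
-- the fuel argument bounds the iteration count, hi - lo, so recursion is structural)
def pvBisect (lines : Nat) : Nat → Nat → Nat → Nat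
  | 0, lo, _ => lo
  | fuel + 1, lo, hi =>
    if lo < hi then
      let mid := (lo + hi) / 2
      if lines < pvThresholds.getD mid 0 then pvBisect lines fuel lo mid
      else pvBisect lines fuel (mid + 1) hi
    else lo

def estimate_study_time_py_alt (content : String) : String :=
  let lines := ((PySem.Str.split? content "\n").getD []).foldl
    (fun acc l => if PySem.Str.strip l == "" then acc else acc + 1) 0
  pvResults.getD (pvBisect lines pvThresholds.length 0 pvThresholds.length) ""

-- ===== PRECONDITION & SPEC =====
def Spec_estimate_study_time_py (content : String) (out : String) : Prop := out = estimate_study_time_py_alt content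
instance (content : String) (out : String) : Decidable (Spec_estimate_study_time_py content out) := by unfold Spec_estimate_study_time_py; infer_instance

-- ===== CLAIM (what is proved, stated in full; the proofs are below) =====
def Claim_equal_estimate_study_time_py : Prop := ∀ (content : String), Dom_estimate_study_time_py content → Spec_estimate_study_time_py content (estimate_study_time_py content)

-- ===== LEMMAS AND PROOFS =====

-- the one-pass sum counts exactly the elements the filter keeps
theorem pv_count_eq (l : List String) (acc : Nat) :
    l.foldl (fun acc l => if PySem.Str.strip l == "" then acc else acc + 1) acc
      = acc + (l.filter (fun l => !(PySem.Str.strip l == ""))).length := by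
  induction l generalizing acc with
  | nil => simp
  | cons x xs ih =>
    simp only [List.foldl_cons, List.filter_cons, ih]
    by_cases h : PySem.Str.strip x == ""
    · simp [h]
    · simp [h]; omega

-- the binary search into the tables reproduces the if/elif cascade
theorem pv_bisect_eq (n : Nat) :
    pvResults.getD (pvBisect n pvThresholds.length 0 pvThresholds.length) ""
      = (if n < 200 then "2-3" else if n < 500 then "3-4"
         else if n < 1000 then "4-6" else "6-8") := by
  have key : pvBisect n pvThresholds.length 0 pvThresholds.length
      = if n < 200 then 0 else if n < 500 then 1 else if n < 1000 then 2 else 3 := by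
    rcases Nat.lt_or_ge n 500 with h2 | h2
    · rcases Nat.lt_or_ge n 200 with h1 | h1
      · simp [pvBisect, pvThresholds, h1, h2]
      · simp [pvBisect, pvThresholds, Nat.not_lt.mpr h1, h2]
    · have h1 : ¬ n < 200 := by omega
      rcases Nat.lt_or_ge n 1000 with h3 | h3
      · simp [pvBisect, pvThresholds, Nat.not_lt.mpr h2, h1, h3]
      · simp [pvBisect, pvThresholds, Nat.not_lt.mpr h2, h1, Nat.not_lt.mpr h3]
  rw [key]
  split_ifs <;> rfl

-- ===== VERDICT (by name: the statement is the Claim_ definition above) =====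
theorem estimate_study_time_py_spec : Claim_equal_estimate_study_time_py := by
  intro content _
  unfold Spec_estimate_study_time_py estimate_study_time_py estimate_study_time_py_alt
  rw [pv_count_eq, Nat.zero_add, pv_bisect_eq]
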